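-- pv_equiv track=rewrite | github.com/Simonsbasement/COMP560Project | heuristics.py | h_defense
-- ===== SOURCE A (Python) =====
-- def h_defense(b, n, w):
--     opponent = 2 if n == 1 else 1
--     height = len(b)
--     width = len(b[0])
--     score = 0
--
--     # Helper function to count threats within a line
--     def count_threats(line, opponent, seq_length):
--         count = 0
--         for i in range(len(line) - seq_length + 1):
--             segment = line[i:i+seq_length]
--             if segment.count(opponent) == seq_length - 1 and segment.count(0) == 1:
--                 count += 1
--         return count
--
--     # Check all possible lines on the board
--     # Horizontal lines
--     for r in range(height):
--         horizontal = [b[r][c] for c in range(width)]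
--         score += count_threats(horizontal, opponent, w) * -10
--
--     # Vertical lines
--     for c in range(width):
--         vertical = [b[r][c] for r in range(height)]
--         score += count_threats(vertical, opponent, w) * -10
--
--     # Diagonal lines (\ direction)
--     for r in range(height - w + 1):
--         for c in range(width - w + 1):
--             diag1 = [b[r+i][c+i] for i in range(w)]
--             score += count_threats(diag1, opponent, w) * -10
--
--     # Diagonal lines (/ direction)
--     for r in range(w - 1, height):
--         for c in range(width - w + 1):
--             diag2 = [b[r-i][c+i] for i in range(w)]
--             score += count_threats(diag2, opponent, w) * -10
--
--     return score
-- ===== SOURCE B (Python) =====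
-- def h_defense(b, n, w):
--     opponent = 2 if n == 1 else 1
--     H = len(b)
--     W = len(b[0])
--
--     # Sliding-window threat counter: maintain counts of opponent pieces and
--     # empty cells in the current window instead of recounting each segment.
--     def slide(line):
--         L = len(line)
--         if w <= 0 or L < w:
--             return 0
--         co = 0
--         cz = 0
--         for x in line[:w]:
--             if x == opponent:
--                 co += 1
--             elif x == 0:
--                 cz += 1
--         cnt = 1 if (co == w - 1 and cz == 1) else 0
--         for i in range(1, L - w + 1):
--             out = line[i - 1]
--             inc = line[i + w - 1]
--             if out == opponent:
--                 co -= 1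
--             elif out == 0:
--                 cz -= 1
--             if inc == opponent:
--                 co += 1
--             elif inc == 0:
--                 cz += 1
--             if co == w - 1 and cz == 1:
--                 cnt += 1
--         return cnt
--
--     threats = 0
--     # rows (clipped to the board width, as A reads only the first W cells)
--     for row in b:
--         threats += slide(row[:W])
--     # columns
--     for c in range(W):
--         threats += slide([b[r][c] for r in range(H)])
--     # \-diagonals: one maximal line per starting cell on the top/left border
--     for c in range(W):
--         threats += slide([b[i][c + i] for i in range(min(H, W - c))])
--     for r in range(1, H):
--         threats += slide([b[r + i][i] for i in range(min(H - r, W))])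
--     # /-diagonals: one maximal line per starting cell on the left/bottom border
--     for r in range(H):
--         threats += slide([b[r - i][i] for i in range(min(r + 1, W))])
--     for c in range(1, W):
--         threats += slide([b[H - 1 - i][c + i] for i in range(min(H, W - c))])
--     return -10 * threats
-- ===== Notes on version B (the rewrite author's own statement) =====
-- stated objective: alternative
-- what changed: B replaces A's per-window recount (slicing each length-w segment and calling count twice) by a sliding window that maintains running counts of opponent pieces and empty cells along each maximal line, enumerating rows, columns and full diagonals once instead of re-extracting a length-w list for every window position.
import Mathlib
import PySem

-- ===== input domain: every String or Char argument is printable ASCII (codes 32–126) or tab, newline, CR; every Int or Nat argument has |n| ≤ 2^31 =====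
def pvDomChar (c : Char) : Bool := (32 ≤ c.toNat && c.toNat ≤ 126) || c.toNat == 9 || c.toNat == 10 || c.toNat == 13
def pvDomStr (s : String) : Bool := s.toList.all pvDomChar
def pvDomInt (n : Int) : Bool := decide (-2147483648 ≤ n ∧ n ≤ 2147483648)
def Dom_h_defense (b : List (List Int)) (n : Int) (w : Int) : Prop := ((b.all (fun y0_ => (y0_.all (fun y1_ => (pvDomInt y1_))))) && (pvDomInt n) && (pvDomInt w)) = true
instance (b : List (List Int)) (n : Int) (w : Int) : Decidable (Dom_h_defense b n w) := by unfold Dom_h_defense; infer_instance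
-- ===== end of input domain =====

-- B counts threats with a sliding window (running counts of opponent/empty cells) along each
-- maximal line (rows, columns, full diagonals) instead of A's re-extraction and double recount
-- of every length-w segment (alternative algorithm; not measured faster on the test inputs).

-- ===== PORT A =====
def countThreatsA (line : List Int) (opponent : Int) (seqLength : Int) : Int :=
  (PySem.List.pyRange 0 (PySem.List.len line - seqLength + 1) 1).foldl
    (fun count i =>
      let segment := PySem.List.slice line (some i) (some (i + seqLength))
      if (PySem.List.count segment opponent : Int) = seqLength - 1 ∧
         (PySem.List.count segment 0 : Int) = 1 then count + 1 else count)
    0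

def h_defense (b : List (List Int)) (n : Int) (w : Int) : Int :=
  let opponent : Int := if n = 1 then 2 else 1
  let height := PySem.List.len b
  let width := PySem.List.len (PySem.List.pyGetD b 0 [])
  let score : Int := 0
  let score := (PySem.List.pyRange 0 height 1).foldl (fun score r =>
    let horizontal := (PySem.List.pyRange 0 width 1).map
      (fun c => PySem.List.pyGetD (PySem.List.pyGetD b r []) c 0)
    score + countThreatsA horizontal opponent w * (-10)) score
  let score := (PySem.List.pyRange 0 width 1).foldl (fun score c =>
    let vertical := (PySem.List.pyRange 0 height 1).map
      (fun r => PySem.List.pyGetD (PySem.List.pyGetD b r []) c 0)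
    score + countThreatsA vertical opponent w * (-10)) score
  let score := (PySem.List.pyRange 0 (height - w + 1) 1).foldl (fun score r =>
    (PySem.List.pyRange 0 (width - w + 1) 1).foldl (fun score c =>
      let diag1 := (PySem.List.pyRange 0 w 1).map
        (fun i => PySem.List.pyGetD (PySem.List.pyGetD b (r + i) []) (c + i) 0)
      score + countThreatsA diag1 opponent w * (-10)) score) score
  let score := (PySem.List.pyRange (w - 1) height 1).foldl (fun score r =>
    (PySem.List.pyRange 0 (width - w + 1) 1).foldl (fun score c =>
      let diag2 := (PySem.List.pyRange 0 w 1).map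
        (fun i => PySem.List.pyGetD (PySem.List.pyGetD b (r - i) []) (c + i) 0)
      score + countThreatsA diag2 opponent w * (-10)) score) score
  score

-- ===== PORT B =====
-- body of slide's main loop in Source B (the two if/elif updates and the threat check)
def slideStep (opponent w : Int) (line : List Int) (s : (Int × Int) × Int) (i : Int) :
    (Int × Int) × Int :=
  let outv := PySem.List.pyGetD line (i - 1) 0
  let inv := PySem.List.pyGetD line (i + w - 1) 0
  let s1 := if outv = opponent then (s.1.1 - 1, s.1.2)
            else if outv = 0 then (s.1.1, s.1.2 - 1) else s.1
  let s2 := if inv = opponent then (s1.1 + 1, s1.2)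
            else if inv = 0 then (s1.1, s1.2 + 1) else s1
  (s2, if s2.1 = w - 1 ∧ s2.2 = 1 then s.2 + 1 else s.2)

def slideB (opponent : Int) (w : Int) (line : List Int) : Int :=
  let L := PySem.List.len line
  if w ≤ 0 ∨ L < w then 0
  else
    let p := (PySem.List.slice line none (some w)).foldl
      (fun (s : Int × Int) x =>
        if x = opponent then (s.1 + 1, s.2)
        else if x = 0 then (s.1, s.2 + 1) else s) (0, 0)
    let cnt : Int := if p.1 = w - 1 ∧ p.2 = 1 then 1 else 0
    let st := (PySem.List.pyRange 1 (L - w + 1) 1).foldl (slideStep opponent w line) (p, cnt)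
    st.2

def h_defense_alt (b : List (List Int)) (n : Int) (w : Int) : Int :=
  let opponent : Int := if n = 1 then 2 else 1
  let H := PySem.List.len b
  let W := PySem.List.len (PySem.List.pyGetD b 0 [])
  let t : Int := b.foldl (fun t row =>
    t + slideB opponent w (PySem.List.slice row none (some W))) 0
  let t := (PySem.List.pyRange 0 W 1).foldl (fun t c =>
    t + slideB opponent w ((PySem.List.pyRange 0 H 1).map
      (fun r => PySem.List.pyGetD (PySem.List.pyGetD b r []) c 0))) t
  let t := (PySem.List.pyRange 0 W 1).foldl (fun t c =>
    t + slideB opponent w ((PySem.List.pyRange 0 (min H (W - c)) 1).map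
      (fun i => PySem.List.pyGetD (PySem.List.pyGetD b i []) (c + i) 0))) t
  let t := (PySem.List.pyRange 1 H 1).foldl (fun t r =>
    t + slideB opponent w ((PySem.List.pyRange 0 (min (H - r) W) 1).map
      (fun i => PySem.List.pyGetD (PySem.List.pyGetD b (r + i) []) i 0))) t
  let t := (PySem.List.pyRange 0 H 1).foldl (fun t r =>
    t + slideB opponent w ((PySem.List.pyRange 0 (min (r + 1) W) 1).map
      (fun i => PySem.List.pyGetD (PySem.List.pyGetD b (r - i) []) i 0))) t
  let t := (PySem.List.pyRange 1 W 1).foldl (fun t c =>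
    t + slideB opponent w ((PySem.List.pyRange 0 (min H (W - c)) 1).map
      (fun i => PySem.List.pyGetD (PySem.List.pyGetD b (H - 1 - i) []) (c + i) 0))) t
  let result := -10 * t
  result

-- ===== PRECONDITION & SPEC =====
-- Pre_ excludes exactly the inputs on which A raises IndexError: the empty board
-- (b[0] fails) and ragged boards with a row shorter than the first row (b[r][c] fails).
def Pre_h_defense (b : List (List Int)) (n : Int) (w : Int) : Prop :=
  b ≠ [] ∧ ∀ row ∈ b, (b.getD 0 []).length ≤ row.length
instance (b : List (List Int)) (n : Int) (w : Int) : Decidable (Pre_h_defense b n w) := by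
  unfold Pre_h_defense; infer_instance
def pvWitness_h_defense : List (List Int) × Int × Int := ([[0, 1, 1], [1, 0, 2], [2, 2, 0]], 1, 3)

def Spec_h_defense (b : List (List Int)) (n : Int) (w : Int) (out : Int) : Prop := out = h_defense_alt b n w
instance (b : List (List Int)) (n : Int) (w : Int) (out : Int) : Decidable (Spec_h_defense b n w out) := by unfold Spec_h_defense; infer_instance

-- ===== CLAIM (what is proved, stated in full; the proofs are below) =====
def Claim_equal_h_defense : Prop := ∀ (b : List (List Int)) (n : Int) (w : Int), Dom_h_defense b n w → Pre_h_defense b n w → Spec_h_defense b n w (h_defense b n w)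

-- ===== LEMMAS AND PROOFS =====

-- cell accessor
def gget (b : List (List Int)) (r c : ℕ) : Int := (b.getD r []).getD c 0

-- 0/1 indicator of a threat window
def ind (opp w : Int) (l : List Int) : Int :=
  if (l.count opp : Int) = w - 1 ∧ (l.count 0 : Int) = 1 then 1 else 0

-- the window of width wn at offset j of the line i ↦ f i
def win (f : ℕ → Int) (wn j : ℕ) : List Int := (List.range wn).map (fun i => f (j + i))

-- number of threat windows on the length-n line f
def TT (opp w : Int) (f : ℕ → Int) (n : ℕ) : Int :=
  ∑ j ∈ Finset.range (n + 1 - w.toNat), ind opp w (win f w.toNat j)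

theorem list_sum_range (m : ℕ) (f : ℕ → Int) :
    ((List.range m).map f).sum = ∑ j ∈ Finset.range m, f j := by
  induction m with
  | zero => simp
  | succ m ih =>
    rw [List.range_succ, List.map_append, List.sum_append, Finset.sum_range_succ, ih]
    simp

theorem map_eq_map_range {α : Type} (l : List α) (d : α) :
    l = (List.range l.length).map (fun k => l.getD k d) := by
  apply List.ext_getElem
  · simp
  · intro i h1 h2
    simp only [List.getElem_map, List.getElem_range]
    rw [List.getD_eq_getElem?_getD, List.getElem?_eq_getElem h1, Option.getD_some]

theorem getD_map_range_lt (f : ℕ → Int) {n j : ℕ} (h : j < n) (d : Int) :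
    (((List.range n).map f).getD j d) = f j := by
  rw [List.getD_eq_getElem?_getD, List.getElem?_eq_getElem (by simpa using h)]
  simp

theorem window_eq (f : ℕ → Int) {n j wn : ℕ} (h : j + wn ≤ n) :
    (((List.range n).map f).drop j).take wn = win f wn j := by
  apply List.ext_getElem
  · simp [win]; omega
  · intro i h1 h2
    simp [win, List.getElem_take, List.getElem_drop]

theorem win_zero (f : ℕ → Int) (wn : ℕ) :
    win f wn 0 = (List.range wn).map f := by
  simp [win]

theorem ite_add_ind (opp w : Int) (l : List Int) (acc : Int) :
    (if (l.count opp : Int) = w - 1 ∧ (l.count 0 : Int) = 1 then acc + 1 else acc)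
      = acc + ind opp w l := by
  unfold ind; split <;> simp

theorem countThreatsA_eq_TT (opp w : Int) (hw : 1 ≤ w) (f : ℕ → Int) (n : ℕ) :
    countThreatsA ((List.range n).map f) opp w = TT opp w f n := by
  have hm : (((n : Int)) - w + 1 - 0).toNat = n + 1 - w.toNat := by omega
  simp only [countThreatsA, PySem.List.len_eq, List.length_map, List.length_range]
  rw [PySem.List.pyRange_one, hm, List.foldl_map]
  calc List.foldl (fun (x : Int) (y : ℕ) =>
        if (PySem.List.count (PySem.List.slice (List.map f (List.range n))
              (some (0 + (y : Int))) (some (0 + (y : Int) + w))) opp : Int) = w - 1 ∧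
           (PySem.List.count (PySem.List.slice (List.map f (List.range n))
              (some (0 + (y : Int))) (some (0 + (y : Int) + w))) 0 : Int) = 1
        then x + 1 else x) 0 (List.range (n + 1 - w.toNat))
      = List.foldl (fun (x : Int) (y : ℕ) => x + ind opp w (win f w.toNat y)) 0
          (List.range (n + 1 - w.toNat)) := by
        apply PySem.List.foldl_congr_mem
        intro acc k hk
        simp only [List.mem_range] at hk
        simp only [zero_add]
        rw [show ((k : Int) + w) = ((k + w.toNat : ℕ) : Int) by push_cast; omega]
        rw [PySem.List.slice_natCast]
        rw [show k + w.toNat - k = w.toNat from by omega]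
        rw [window_eq f (by omega)]
        simp only [PySem.List.count_eq]
        exact ite_add_ind opp w _ acc
    _ = TT opp w f n := by
        rw [PySem.List.foldl_add, list_sum_range]
        simp [TT]

theorem countThreatsA_nonpos (opp w : Int) (hw : w ≤ 0) (line : List Int) :
    countThreatsA line opp w = 0 := by
  simp only [countThreatsA]
  have hfun : (fun (count i : Int) =>
      if (PySem.List.count (PySem.List.slice line (some i) (some (i + w))) opp : Int) = w - 1 ∧
         (PySem.List.count (PySem.List.slice line (some i) (some (i + w))) 0 : Int) = 1
      then count + 1 else count) = fun (count : Int) (_ : Int) => count := by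
    funext count i
    split
    · next h =>
      exfalso
      have h0 : (0 : Int) ≤ (PySem.List.count (PySem.List.slice line (some i) (some (i + w))) opp : Int) :=
        Int.natCast_nonneg _
      omega
    · rfl
  rw [hfun, PySem.List.foldl_ignore]

theorem slideB_nonpos (opp w : Int) (hw : w ≤ 0) (l : List Int) : slideB opp w l = 0 := by
  simp [slideB, hw]

theorem count_fold (opp : Int) (hopp : opp ≠ 0) : ∀ (l : List Int) (c z : Int),
    (l.foldl (fun (s : Int × Int) x =>
      if x = opp then (s.1 + 1, s.2)
      else if x = 0 then (s.1, s.2 + 1) else s) (c, z))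
    = (c + (l.count opp : Int), z + (l.count 0 : Int)) := by
  intro l
  induction l with
  | nil => intro c z; simp
  | cons x t ih =>
    intro c z
    rw [List.foldl_cons]
    by_cases hx : x = opp
    · rw [if_pos hx, ih]
      have hx0 : ¬(x = 0) := by rw [hx]; exact hopp
      have e1 : (x :: t).count opp = t.count opp + 1 := by simp [List.count_cons, hx]
      have e2 : (x :: t).count 0 = t.count 0 := by simp [List.count_cons, hx0]
      rw [e1, e2, Prod.mk.injEq]
      constructor <;> push_cast <;> ring
    · by_cases h0 : x = 0
      · rw [if_neg hx, if_pos h0, ih]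
        have e1 : (x :: t).count opp = t.count opp := by simp [List.count_cons, hx]
        have e2 : (x :: t).count 0 = t.count 0 + 1 := by simp [List.count_cons, h0]
        rw [e1, e2, Prod.mk.injEq]
        constructor <;> push_cast <;> ring
      · rw [if_neg hx, if_neg h0, ih]
        have e1 : (x :: t).count opp = t.count opp := by simp [List.count_cons, hx]
        have e2 : (x :: t).count 0 = t.count 0 := by simp [List.count_cons, h0]
        rw [e1, e2]

theorem count_win_succ (x : Int) (f : ℕ → Int) (wn j : ℕ) (hwn : 1 ≤ wn) :
    ((win f wn (j + 1)).count x : Int)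
      = ((win f wn j).count x : Int)
        - (if f j = x then 1 else 0) + (if f (j + wn) = x then 1 else 0) := by
  have hrec : wn = (wn - 1) + 1 := by omega
  have h1 : win f wn j = f j :: (List.range (wn - 1)).map (fun i => f (j + 1 + i)) := by
    conv_lhs => rw [win, hrec]
    rw [List.range_succ_eq_map, List.map_cons, List.map_map]
    refine congrArg₂ List.cons (congrArg f (by omega)) (List.map_congr_left ?_)
    intro a _
    simp only [Function.comp_apply]
    congr 1
    omega
  have h2 : win f wn (j + 1)
      = (List.range (wn - 1)).map (fun i => f (j + 1 + i)) ++ [f (j + wn)] := by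
    conv_lhs => rw [win, hrec]
    rw [List.range_succ, List.map_append]
    have e : j + 1 + (wn - 1) = j + wn := by omega
    simp only [List.map_cons, List.map_nil, e]
  rw [h1, h2, List.count_cons, List.count_append]
  by_cases hj : f j = x <;> by_cases hw2 : f (j + wn) = x <;>
    simp [hj, hw2] <;> push_cast <;> ring

-- the two if/elif updates of Source B's loop body, as pure functions
def updOut (opp outv : Int) (p : Int × Int) : Int × Int :=
  if outv = opp then (p.1 - 1, p.2) else if outv = 0 then (p.1, p.2 - 1) else p

def updIn (opp inv : Int) (p : Int × Int) : Int × Int :=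
  if inv = opp then (p.1 + 1, p.2) else if inv = 0 then (p.1, p.2 + 1) else p

theorem slideStep_app (opp w : Int) (line : List Int) (s : (Int × Int) × Int) (i : Int) :
    slideStep opp w line s i
      = (updIn opp (PySem.List.pyGetD line (i + w - 1) 0)
           (updOut opp (PySem.List.pyGetD line (i - 1) 0) s.1),
         if (updIn opp (PySem.List.pyGetD line (i + w - 1) 0)
              (updOut opp (PySem.List.pyGetD line (i - 1) 0) s.1)).1 = w - 1 ∧
            (updIn opp (PySem.List.pyGetD line (i + w - 1) 0)
              (updOut opp (PySem.List.pyGetD line (i - 1) 0) s.1)).2 = 1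
         then s.2 + 1 else s.2) := rfl

theorem update_counts (opp : Int) (hopp : opp ≠ 0) (f : ℕ → Int) (wn j : ℕ) (hwn : 1 ≤ wn) :
    updIn opp (f (j + wn)) (updOut opp (f j)
        (((win f wn j).count opp : Int), ((win f wn j).count 0 : Int)))
      = (((win f wn (j + 1)).count opp : Int), ((win f wn (j + 1)).count 0 : Int)) := by
  have hco := count_win_succ opp f wn j hwn
  have hcz := count_win_succ 0 f wn j hwn
  rw [Prod.ext_iff]
  unfold updIn updOut
  constructor <;> (split_ifs <;> simp_all <;> omega)

theorem slide_loop (opp w : Int) (hw : 1 ≤ w) (hopp : opp ≠ 0) (f : ℕ → Int) (n : ℕ)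
    (hn : w.toNat ≤ n) :
    ∀ (d j : ℕ), j + w.toNat + d = n → ∀ acc : Int,
    ((PySem.List.pyRange ((j : Int) + 1) ((n : Int) - w + 1) 1).foldl
        (slideStep opp w ((List.range n).map f))
        ((((win f w.toNat j).count opp : Int), ((win f w.toNat j).count 0 : Int)), acc)).2
    = acc + ∑ t ∈ Finset.Ico (j + 1) (n + 1 - w.toNat), ind opp w (win f w.toNat t) := by
  intro d
  induction d with
  | zero =>
    intro j hj acc
    rw [PySem.List.pyRange_one_eq_nil (by omega)]
    rw [Finset.Ico_eq_empty (by omega)]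
    simp
  | succ d ih =>
    intro j hj acc
    have hlt : (j : Int) + 1 < (n : Int) - w + 1 := by omega
    rw [PySem.List.pyRange_one_cons hlt, List.foldl_cons, slideStep_app]
    have eo : PySem.List.pyGetD ((List.range n).map f) ((j : Int) + 1 - 1) 0 = f j := by
      rw [show ((j : Int) + 1 - 1) = ((j : ℕ) : Int) by ring, PySem.List.pyGetD_natCast]
      exact getD_map_range_lt f (by omega) 0
    have ei : PySem.List.pyGetD ((List.range n).map f) ((j : Int) + 1 + w - 1) 0
        = f (j + w.toNat) := by
      rw [show ((j : Int) + 1 + w - 1) = (((j + w.toNat : ℕ)) : Int) by push_cast; omega,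
        PySem.List.pyGetD_natCast]
      exact getD_map_range_lt f (by omega) 0
    rw [eo, ei]
    dsimp only
    rw [update_counts opp hopp f w.toNat j (by omega)]
    dsimp only
    rw [ite_add_ind opp w (win f w.toNat (j + 1)) acc]
    rw [show ((j : Int) + 1 + 1) = (((j + 1 : ℕ)) : Int) + 1 by push_cast; ring]
    rw [ih (j + 1) (by omega) (acc + ind opp w (win f w.toNat (j + 1)))]
    conv_rhs => rw [Finset.sum_eq_sum_Ico_succ_bot (a := j + 1) (b := n + 1 - w.toNat)
      (by omega) (fun t => ind opp w (win f w.toNat t))]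
    ring

theorem slideB_eq_TT (opp w : Int) (hw : 1 ≤ w) (hopp : opp ≠ 0) (f : ℕ → Int) (n : ℕ) :
    slideB opp w ((List.range n).map f) = TT opp w f n := by
  by_cases hn : n < w.toNat
  · simp only [slideB, PySem.List.len_eq, List.length_map, List.length_range]
    rw [if_pos (Or.inr (by omega))]
    simp [TT, show n + 1 - w.toNat = 0 from by omega]
  · simp only [slideB, PySem.List.len_eq, List.length_map, List.length_range]
    rw [if_neg (not_or.mpr ⟨by omega, by omega⟩)]
    rw [PySem.List.slice_to (xs := (List.range n).map f) (b := w) (by omega)]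
    have htake : ((List.range n).map f).take w.toNat = win f w.toNat 0 := by
      have := window_eq f (show 0 + w.toNat ≤ n by omega)
      rwa [List.drop_zero] at this
    rw [htake, count_fold opp hopp]
    dsimp only
    simp only [zero_add]
    have hloop := slide_loop opp w hw hopp f n (by omega) (n - w.toNat) 0 (by omega)
      (if ((win f w.toNat 0).count opp : Int) = w - 1 ∧ ((win f w.toNat 0).count 0 : Int) = 1
       then 1 else 0)
    rw [show (((0 : ℕ) : Int)) + 1 = 1 by norm_num] at hloop
    rw [hloop]
    rw [show (if ((win f w.toNat 0).count opp : Int) = w - 1 ∧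
          ((win f w.toNat 0).count 0 : Int) = 1 then (1 : Int) else 0)
        = ind opp w (win f w.toNat 0) from rfl]
    rw [TT, Finset.range_eq_Ico]
    conv_rhs => rw [Finset.sum_eq_sum_Ico_succ_bot (a := 0) (b := n + 1 - w.toNat)
      (by omega) (fun t => ind opp w (win f w.toNat t))]

theorem fold_sum (G : Int → Int) (a bnd : Int) (init : Int) :
    (PySem.List.pyRange a bnd 1).foldl (fun acc x => acc + G x) init
      = init + ∑ k ∈ Finset.range ((bnd - a).toNat), G (a + k) := by
  rw [PySem.List.foldl_add, PySem.List.pyRange_one, List.map_map, list_sum_range]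
  rfl

theorem sum_map_eq_range {α : Type} (l : List α) (d : α) (q : α → Int) :
    (l.map q).sum = ∑ k ∈ Finset.range l.length, q (l.getD k d) := by
  conv_lhs => rw [map_eq_map_range l d]
  rw [List.map_map, list_sum_range]
  simp [Function.comp]

theorem pyLine (m : Int) (F : Int → Int) :
    (PySem.List.pyRange 0 m 1).map F
      = (List.range (m - 0).toNat).map (fun i : ℕ => F (0 + (i : Int))) := by
  rw [PySem.List.pyRange_one, List.map_map]
  rfl

theorem toNat_HW (w : Int) (hw : 1 ≤ w) (a : ℕ) :
    ((a : Int) - w + 1).toNat = a + 1 - w.toNat := by omega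
theorem toNat_HW2 (w : Int) (hw : 1 ≤ w) (a : ℕ) :
    ((a : Int) - (w - 1)).toNat = a + 1 - w.toNat := by omega
theorem toNat_pred (a : ℕ) : ((a : Int) - 1).toNat = a - 1 := by omega
theorem toNat_sub_one_add (a b : ℕ) : ((a : Int) - (1 + (b : Int))).toNat = a - (1 + b) := by omega
theorem toNat_cast_add_one (a : ℕ) : ((a : Int) + 1).toNat = a + 1 := by omega
theorem toNat_min (x y : Int) : (min x y).toNat = min x.toNat y.toNat := by omega

theorem TT_window (opp w : Int) (hw : 1 ≤ w) (f : ℕ → Int) :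
    TT opp w f w.toNat = ind opp w ((List.range w.toNat).map f) := by
  rw [TT, show w.toNat + 1 - w.toNat = 1 from by omega, Finset.sum_range_one, win_zero]

theorem min_facts (X Y : ℕ) :
    min X Y ≤ X ∧ min X Y ≤ Y ∧ (min X Y = X ∨ min X Y = Y) :=
  ⟨Nat.min_le_left X Y, Nat.min_le_right X Y, min_choice X Y⟩

theorem regroup1 (F : ℕ → ℕ → Int) (Hn Wn wn : ℕ) (hwn : 1 ≤ wn) :
    ((∑ c ∈ Finset.range Wn, ∑ j ∈ Finset.range (min Hn (Wn - c) + 1 - wn), F j (c + j))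
      + ∑ r ∈ Finset.range (Hn - 1), ∑ j ∈ Finset.range (min (Hn - (1 + r)) Wn + 1 - wn),
          F (1 + r + j) j)
    = ∑ k ∈ Finset.range (Hn + 1 - wn), ∑ c ∈ Finset.range (Wn + 1 - wn), F k c := by
  rw [← Finset.sum_product' (Finset.range (Hn + 1 - wn)) (Finset.range (Wn + 1 - wn))
    (fun k c => F k c)]
  rw [← Finset.sum_filter_add_sum_filter_not
    (Finset.range (Hn + 1 - wn) ×ˢ Finset.range (Wn + 1 - wn)) (fun p => p.1 ≤ p.2)
    (fun p => F p.1 p.2)]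
  congr 1
  · rw [Finset.sum_sigma' (Finset.range Wn)
      (fun c => Finset.range (min Hn (Wn - c) + 1 - wn)) (fun c j => F j (c + j))]
    refine Finset.sum_nbij' (fun p => (p.2, p.1 + p.2)) (fun p => ⟨p.2 - p.1, p.1⟩)
      ?_ ?_ ?_ ?_ ?_
    · rintro ⟨c, j⟩ ha
      simp only [Finset.mem_sigma, Finset.mem_range] at ha
      simp only [Finset.mem_filter, Finset.mem_product, Finset.mem_range]
      obtain ⟨m1, m2, m3⟩ := min_facts Hn (Wn - c)
      rcases m3 with m3 | m3 <;> simp only [m3] at * <;> omega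
    · rintro ⟨k, c2⟩ hp
      simp only [Finset.mem_filter, Finset.mem_product, Finset.mem_range] at hp
      simp only [Finset.mem_sigma, Finset.mem_range]
      obtain ⟨m1, m2, m3⟩ := min_facts Hn (Wn - (c2 - k))
      rcases m3 with m3 | m3 <;> simp only [m3] at * <;> omega
    · rintro ⟨c, j⟩ ha
      simp only [Finset.mem_sigma, Finset.mem_range] at ha
      simp only [Sigma.mk.injEq, heq_eq_eq]
      exact ⟨by omega, trivial⟩
    · rintro ⟨k, c2⟩ hp
      simp only [Finset.mem_filter, Finset.mem_product, Finset.mem_range] at hp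
      simp only [Prod.mk.injEq]
      exact ⟨trivial, by omega⟩
    · rintro ⟨c, j⟩ _
      rfl
  · rw [Finset.sum_sigma' (Finset.range (Hn - 1))
      (fun r => Finset.range (min (Hn - (1 + r)) Wn + 1 - wn)) (fun r j => F (1 + r + j) j)]
    refine Finset.sum_nbij' (fun p => (1 + p.1 + p.2, p.2)) (fun p => ⟨p.1 - p.2 - 1, p.2⟩)
      ?_ ?_ ?_ ?_ ?_
    · rintro ⟨r, j⟩ ha
      simp only [Finset.mem_sigma, Finset.mem_range] at ha
      simp only [Finset.mem_filter, Finset.mem_product, Finset.mem_range]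
      obtain ⟨m1, m2, m3⟩ := min_facts (Hn - (1 + r)) Wn
      rcases m3 with m3 | m3 <;> simp only [m3] at * <;> omega
    · rintro ⟨k, c2⟩ hp
      simp only [Finset.mem_filter, Finset.mem_product, Finset.mem_range] at hp
      simp only [Finset.mem_sigma, Finset.mem_range]
      obtain ⟨m1, m2, m3⟩ := min_facts (Hn - (1 + (k - c2 - 1))) Wn
      rcases m3 with m3 | m3 <;> simp only [m3] at * <;> omega
    · rintro ⟨r, j⟩ ha
      simp only [Finset.mem_sigma, Finset.mem_range] at ha
      simp only [Sigma.mk.injEq, heq_eq_eq]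
      exact ⟨by omega, trivial⟩
    · rintro ⟨k, c2⟩ hp
      simp only [Finset.mem_filter, Finset.mem_product, Finset.mem_range] at hp
      simp only [Prod.mk.injEq]
      exact ⟨by omega, trivial⟩
    · rintro ⟨r, j⟩ _
      rfl

theorem regroup2 (F : ℕ → ℕ → Int) (Hn Wn wn : ℕ) (hwn : 1 ≤ wn) :
    ((∑ r ∈ Finset.range Hn, ∑ j ∈ Finset.range (min (r + 1) Wn + 1 - wn), F (r + 1 - wn - j) j)
      + ∑ c ∈ Finset.range (Wn - 1), ∑ j ∈ Finset.range (min Hn (Wn - (1 + c)) + 1 - wn),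
          F (Hn - wn - j) (1 + c + j))
    = ∑ k ∈ Finset.range (Hn + 1 - wn), ∑ c ∈ Finset.range (Wn + 1 - wn), F k c := by
  rw [← Finset.sum_product' (Finset.range (Hn + 1 - wn)) (Finset.range (Wn + 1 - wn))
    (fun k c => F k c)]
  rw [← Finset.sum_filter_add_sum_filter_not
    (Finset.range (Hn + 1 - wn) ×ˢ Finset.range (Wn + 1 - wn)) (fun p => wn + p.1 + p.2 ≤ Hn)
    (fun p => F p.1 p.2)]
  congr 1
  · rw [Finset.sum_sigma' (Finset.range Hn)
      (fun r => Finset.range (min (r + 1) Wn + 1 - wn)) (fun r j => F (r + 1 - wn - j) j)]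
    refine Finset.sum_nbij' (fun p => (p.1 + 1 - wn - p.2, p.2)) (fun p => ⟨wn - 1 + p.1 + p.2, p.2⟩)
      ?_ ?_ ?_ ?_ ?_
    · rintro ⟨r, j⟩ ha
      simp only [Finset.mem_sigma, Finset.mem_range] at ha
      simp only [Finset.mem_filter, Finset.mem_product, Finset.mem_range]
      obtain ⟨m1, m2, m3⟩ := min_facts (r + 1) Wn
      rcases m3 with m3 | m3 <;> simp only [m3] at * <;> omega
    · rintro ⟨k, c2⟩ hp
      simp only [Finset.mem_filter, Finset.mem_product, Finset.mem_range] at hp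
      simp only [Finset.mem_sigma, Finset.mem_range]
      obtain ⟨m1, m2, m3⟩ := min_facts (wn - 1 + k + c2 + 1) Wn
      rcases m3 with m3 | m3 <;> simp only [m3] at * <;> omega
    · rintro ⟨r, j⟩ ha
      simp only [Finset.mem_sigma, Finset.mem_range] at ha
      simp only [Sigma.mk.injEq, heq_eq_eq]
      obtain ⟨m1, m2, m3⟩ := min_facts (r + 1) Wn
      exact ⟨by rcases m3 with m3 | m3 <;> simp only [m3] at * <;> omega, trivial⟩
    · rintro ⟨k, c2⟩ hp
      simp only [Finset.mem_filter, Finset.mem_product, Finset.mem_range] at hp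
      simp only [Prod.mk.injEq]
      exact ⟨by omega, trivial⟩
    · rintro ⟨r, j⟩ _
      rfl
  · rw [Finset.sum_sigma' (Finset.range (Wn - 1))
      (fun c => Finset.range (min Hn (Wn - (1 + c)) + 1 - wn))
      (fun c j => F (Hn - wn - j) (1 + c + j))]
    refine Finset.sum_nbij' (fun p => (Hn - wn - p.2, 1 + p.1 + p.2))
      (fun p => ⟨p.2 - (Hn - wn - p.1) - 1, Hn - wn - p.1⟩) ?_ ?_ ?_ ?_ ?_
    · rintro ⟨c, j⟩ ha
      simp only [Finset.mem_sigma, Finset.mem_range] at ha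
      simp only [Finset.mem_filter, Finset.mem_product, Finset.mem_range]
      obtain ⟨m1, m2, m3⟩ := min_facts Hn (Wn - (1 + c))
      rcases m3 with m3 | m3 <;> simp only [m3] at * <;> omega
    · rintro ⟨k, c2⟩ hp
      simp only [Finset.mem_filter, Finset.mem_product, Finset.mem_range] at hp
      simp only [Finset.mem_sigma, Finset.mem_range]
      obtain ⟨m1, m2, m3⟩ := min_facts Hn (Wn - (1 + (c2 - (Hn - wn - k) - 1)))
      rcases m3 with m3 | m3 <;> simp only [m3] at * <;> omega
    · rintro ⟨c, j⟩ ha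
      simp only [Finset.mem_sigma, Finset.mem_range] at ha
      simp only [Sigma.mk.injEq, heq_eq_eq]
      obtain ⟨m1, m2, m3⟩ := min_facts Hn (Wn - (1 + c))
      exact ⟨by rcases m3 with m3 | m3 <;> simp only [m3] at * <;> omega, by rcases m3 with m3 | m3 <;> simp only [m3] at * <;> omega⟩
    · rintro ⟨k, c2⟩ hp
      simp only [Finset.mem_filter, Finset.mem_product, Finset.mem_range] at hp
      simp only [Prod.mk.injEq]
      exact ⟨by omega, by omega⟩
    · rintro ⟨c, j⟩ _
      rfl

theorem bridge1 (opp w : Int) (hw : 1 ≤ w) (G : Int → Int → Int) (Hn Wn : ℕ) :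
    ((∑ c ∈ Finset.range Wn, TT opp w (fun i : ℕ => G (i : Int) ((c : Int) + (i : Int)))
        (min Hn (Wn - c)))
      + ∑ r ∈ Finset.range (Hn - 1), TT opp w
          (fun i : ℕ => G (1 + (r : Int) + (i : Int)) (i : Int)) (min (Hn - (1 + r)) Wn))
    = ∑ k ∈ Finset.range (Hn + 1 - w.toNat), ∑ c ∈ Finset.range (Wn + 1 - w.toNat),
        ind opp w ((List.range w.toNat).map
          (fun i : ℕ => G ((k : Int) + (i : Int)) ((c : Int) + (i : Int)))) := by
  simp only [TT]
  rw [← regroup1 (fun k c => ind opp w ((List.range w.toNat).map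
      (fun i : ℕ => G ((k : Int) + (i : Int)) ((c : Int) + (i : Int))))) Hn Wn w.toNat (by omega)]
  congr 1
  · refine Finset.sum_congr rfl ?_
    intro c _
    refine Finset.sum_congr rfl ?_
    intro j _
    congr 1
    rw [win]
    apply List.map_congr_left
    intro i _
    congr 1 <;> push_cast <;> ring
  · refine Finset.sum_congr rfl ?_
    intro r _
    refine Finset.sum_congr rfl ?_
    intro j _
    congr 1
    rw [win]
    apply List.map_congr_left
    intro i _
    congr 1 <;> push_cast <;> ring

theorem bridge2 (opp w : Int) (hw : 1 ≤ w) (G : Int → Int → Int) (Hn Wn : ℕ) :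
    ((∑ r ∈ Finset.range Hn, TT opp w (fun i : ℕ => G ((r : Int) - (i : Int)) (i : Int))
        (min (r + 1) Wn))
      + ∑ c ∈ Finset.range (Wn - 1), TT opp w
          (fun i : ℕ => G ((Hn : Int) - 1 - (i : Int)) (1 + (c : Int) + (i : Int)))
          (min Hn (Wn - (1 + c))))
    = ∑ k ∈ Finset.range (Hn + 1 - w.toNat), ∑ c ∈ Finset.range (Wn + 1 - w.toNat),
        ind opp w ((List.range w.toNat).map
          (fun i : ℕ => G (w - 1 + (k : Int) - (i : Int)) ((c : Int) + (i : Int)))) := by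
  simp only [TT]
  rw [← regroup2 (fun k c => ind opp w ((List.range w.toNat).map
      (fun i : ℕ => G (w - 1 + (k : Int) - (i : Int)) ((c : Int) + (i : Int))))) Hn Wn w.toNat
      (by omega)]
  congr 1
  · refine Finset.sum_congr rfl ?_
    intro r hr
    refine Finset.sum_congr rfl ?_
    intro j hj
    simp only [Finset.mem_range] at hr hj
    obtain ⟨m1, m2, m3⟩ := min_facts (r + 1) Wn
    congr 1
    rw [win]
    apply List.map_congr_left
    intro i hi
    simp only [List.mem_range] at hi
    congr 1 <;> rcases m3 with m3 | m3 <;> simp only [m3] at * <;> omega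
  · refine Finset.sum_congr rfl ?_
    intro c hc
    refine Finset.sum_congr rfl ?_
    intro j hj
    simp only [Finset.mem_range] at hc hj
    obtain ⟨m1, m2, m3⟩ := min_facts Hn (Wn - (1 + c))
    congr 1
    rw [win]
    apply List.map_congr_left
    intro i hi
    simp only [List.mem_range] at hi
    congr 1 <;> rcases m3 with m3 | m3 <;> simp only [m3] at * <;> omega

theorem row_take (b : List (List Int)) (k : ℕ)
    (hrow : (b.getD 0 []).length ≤ (b.getD k []).length) :
    (b.getD k []).take (b.getD 0 []).length
      = (List.range (b.getD 0 []).length).map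
          (fun c : ℕ => PySem.List.pyGetD (PySem.List.pyGetD b (k : Int) []) (c : Int) 0) := by
  apply List.ext_getElem
  · rw [List.length_take, List.length_map, List.length_range]
    exact Nat.min_eq_left hrow
  · intro i h1 h2
    rw [List.getElem_take]
    simp only [List.getElem_map, List.getElem_range, PySem.List.pyGetD_natCast]
    simp only [List.length_take] at h1
    exact (List.getD_eq_getElem (b.getD k []) 0 (lt_min_iff.mp h1).2).symm

theorem AB_main (b : List (List Int)) (n w : Int) (hpre : Pre_h_defense b n w) :
    h_defense b n w = h_defense_alt b n w := by
  obtain ⟨hb, hrows⟩ := hpre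
  have hopp : (if n = 1 then (2 : Int) else 1) ≠ 0 := by split <;> norm_num
  by_cases hw : w ≤ 0
  · have hct : ∀ (line : List Int) (o : Int), countThreatsA line o w = 0 :=
      fun l o => countThreatsA_nonpos o w hw l
    have hsl : ∀ (o : Int) (l : List Int), slideB o w l = 0 :=
      fun o l => slideB_nonpos o w hw l
    simp only [h_defense, h_defense_alt, hct, hsl, zero_mul, add_zero, mul_zero,
      PySem.List.foldl_ignore]
  · have hw1 : 1 ≤ w := by omega
    simp only [h_defense, h_defense_alt, PySem.List.pyGetD_zero, PySem.List.len_eq]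
    simp only [fold_sum]
    rw [PySem.List.foldl_add]
    rw [sum_map_eq_range b ([] : List Int)]
    simp only [pyLine]
    simp only [zero_add, sub_zero, Int.toNat_natCast, toNat_cast_add_one, toNat_min,
      toNat_HW w hw1, toNat_HW2 w hw1, toNat_pred, toNat_sub_one_add, Int.toNat_sub]
    simp only [countThreatsA_eq_TT (if n = 1 then (2 : Int) else 1) w hw1,
      TT_window (if n = 1 then (2 : Int) else 1) w hw1,
      slideB_eq_TT (if n = 1 then (2 : Int) else 1) w hw1 hopp]
    have hR : (∑ k ∈ Finset.range b.length,
          slideB (if n = 1 then (2 : Int) else 1) w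
            (PySem.List.slice (b.getD k []) none (some ((b.getD 0 []).length : Int))))
        = ∑ k ∈ Finset.range b.length,
            TT (if n = 1 then (2 : Int) else 1) w
              (fun c : ℕ => PySem.List.pyGetD (PySem.List.pyGetD b (k : Int) []) (c : Int) 0)
              (b.getD 0 []).length := by
      refine Finset.sum_congr rfl ?_
      intro k hk
      simp only [Finset.mem_range] at hk
      rw [PySem.List.slice_to (xs := b.getD k []) (b := ((b.getD 0 []).length : Int))
        (Int.natCast_nonneg _), Int.toNat_natCast]
      rw [row_take b k (hrows _ (by rw [List.getD_eq_getElem b [] hk]; exact List.getElem_mem hk))]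
      exact slideB_eq_TT _ w hw1 hopp _ _
    rw [hR]
    simp only [← Finset.sum_mul]
    have hb1 := bridge1 (if n = 1 then (2 : Int) else 1) w hw1
      (fun r c => PySem.List.pyGetD (PySem.List.pyGetD b r []) c 0) b.length (b.getD 0 []).length
    have hb2 := bridge2 (if n = 1 then (2 : Int) else 1) w hw1
      (fun r c => PySem.List.pyGetD (PySem.List.pyGetD b r []) c 0) b.length (b.getD 0 []).length
    simp only [] at hb1 hb2
    linear_combination (10 : Int) * hb1 + 10 * hb2

-- ===== VERDICT (by name: the statement is the Claim_ definition above) =====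
theorem h_defense_spec : Claim_equal_h_defense := by
  intro b n w hdom hpre
  unfold Spec_h_defense
  exact AB_main b n w hpre
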